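-- pv_equiv track=rewrite | github.com/XaverLanderl/MPS | exact_diag.py | numbers_with_k_ones
-- ===== SOURCE A (Python) =====
-- import itertools
--
-- def numbers_with_k_ones(L, k):
--     # Generate all positions for 1s in an L-bit binary string
--     positions = range(L)
--
--     # Get all combinations of positions to place k ones
--     combinations = itertools.combinations(positions, k)
--
--     # Create numbers from the combinations
--     result = []
--     for comb in combinations:
--         # Create a binary number with 1s in the chosen positions
--         num = 0
--         for pos in comb:
--             num |= (1 << (L - 1 - pos))  # Set the bit at the chosen position
--
--         # append number to list
--         result.append(bin(num)[2:].zfill(L))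
--
--     # return result
--     return result
-- ===== SOURCE B (Python) =====
-- def numbers_with_k_ones(L, k):
--     # Depth-first search over the L bit positions, MSB first, with an explicit stack:
--     # at each position try '1' (while ones are still available) before '0', so the
--     # strings come out in the same order as A's itertools.combinations enumeration.
--     # Branches that cannot reach k ones in the remaining positions are pruned.
--     result = []
--     stack = [('', 0, 0)]  # (prefix, ones_used, position)
--     while stack:
--         prefix, ones, pos = stack.pop()
--         if pos >= L:
--             if ones == k:
--                 result.append(prefix)
--             continue
--         if ones + (L - pos) < k:
--             continue  # not enough positions left to place the remaining ones
--         # push the '0' branch first so the '1' branch is explored first (LIFO)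
--         stack.append((prefix + '0', ones, pos + 1))
--         if ones < k:
--             stack.append((prefix + '1', ones + 1, pos + 1))
--     return result
-- ===== Notes on version B (the rewrite author's own statement) =====
-- stated objective: alternative
-- what changed: B replaces A's itertools.combinations over bit positions plus integer bit-twiddling and bin()/zfill() string formatting by a direct depth-first search over the L positions (explicit stack, '1' tried before '0') that builds each output string character by character in the same lexicographic order.
-- intended difference: For L <= 0 with k == 0, A returns ['0'] because bin(0)[2:] is '0' and zfill cannot shorten it, while B returns [''], the single length-0 bit string with zero ones, which is the intended value. — e.g. on numbers_with_k_ones(0, 0): A returns ["0"], B returns [""]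
import Mathlib
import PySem

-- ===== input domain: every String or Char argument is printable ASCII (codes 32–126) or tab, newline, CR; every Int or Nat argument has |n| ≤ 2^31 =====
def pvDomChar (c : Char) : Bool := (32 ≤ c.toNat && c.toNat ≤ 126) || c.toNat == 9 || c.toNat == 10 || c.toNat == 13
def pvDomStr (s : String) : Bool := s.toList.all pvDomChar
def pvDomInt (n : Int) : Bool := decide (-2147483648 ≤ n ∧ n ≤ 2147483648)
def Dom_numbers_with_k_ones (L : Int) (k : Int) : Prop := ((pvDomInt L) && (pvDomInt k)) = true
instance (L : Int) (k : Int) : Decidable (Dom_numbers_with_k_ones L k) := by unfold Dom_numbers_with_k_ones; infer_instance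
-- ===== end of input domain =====

-- B replaces A's itertools.combinations + bit arithmetic + bin/zfill string formatting by a
-- direct DFS over bit positions (explicit stack, '1' tried before '0') that builds each string
-- character by character in the same lexicographic order; objective: alternative.

-- ===== PORT A =====

-- itertools.combinations(xs, r) for a list xs, hand-ported: lexicographic order of index
-- tuples, exact for the duplicate-free increasing list A passes (range(L)).
def pyCombinations : List Int → Nat → List (List Int)
  | _, 0 => [[]]
  | [], _ + 1 => []
  | x :: xs, r + 1 => (pyCombinations xs r).map (fun c => x :: c) ++ pyCombinations xs (r + 1)

-- digits of bin(n) after the '0b' prefix, for n ≥ 1 (empty for n = 0)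
def pyBinGo : Nat → List Char
  | 0 => []
  | n + 1 => pyBinGo ((n + 1) / 2) ++ [if (n + 1) % 2 = 1 then '1' else '0']
decreasing_by exact Nat.div_lt_self (Nat.succ_pos n) (by norm_num)

-- bin(n)[2:] for n ≥ 0 (bin(0)[2:] = "0"); num in A is always ≥ 0, so this is exact
def pyBinChars (n : Nat) : List Char := if n = 0 then ['0'] else pyBinGo n

-- str.zfill(L) for an unsigned digit string (no sign handling needed: A's strings never
-- start with '+'/'-'); L ≤ len leaves the string unchanged, as does negative L (.toNat)
def pyZfill (L : Int) (s : List Char) : List Char := List.replicate (L.toNat - s.length) '0' ++ s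

def numbers_with_k_ones (L : Int) (k : Int) : List String :=
  let positions := PySem.List.pyRange 0 L 1
  -- k.toNat is exact on Pre_ (0 ≤ k); Python raises ValueError for k < 0 (excluded by Pre_)
  let combinations := pyCombinations positions k.toNat
  combinations.foldl
    (fun result comb =>
      -- shift amount L-1-pos is ≥ 0 for every pos ∈ range(L), so .toNat is exact
      let num := comb.foldl (fun num pos => Int.lor num ((1 : Int) <<< (L - 1 - pos).toNat)) 0
      result ++ [String.ofList (pyZfill L (pyBinChars num.toNat))])
    []

-- ===== PORT B =====

-- the explicit-stack DFS of Source B: pop a frame, either finish the string (pos ≥ L), prune an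
-- infeasible branch, or push the '0'-extension and, if ones are left, the '1'-extension on
-- top (so '1' is handled first)
def nwkLoop (L : Int) (k : Int) (result : List String) (stack : List (String × Int × Int)) :
    List String :=
  match stack with
  | [] => result
  | (p, ones, pos) :: rest =>
    if L ≤ pos then
      nwkLoop L k (if ones = k then result ++ [p] else result) rest
    else if ones + (L - pos) < k then
      nwkLoop L k result rest
    else
      nwkLoop L k result
        ((if ones < k then [(p ++ "1", ones + 1, pos + 1)] else []) ++
          (p ++ "0", ones, pos + 1) :: rest)
termination_by (stack.map (fun f => 3 ^ (L - f.2.2).toNat)).sum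
decreasing_by
  · have h1 : 1 ≤ 3 ^ (L - pos).toNat := Nat.one_le_pow _ _ (by norm_num)
    simp only [List.map_cons, List.sum_cons]
    omega
  · have h1 : 1 ≤ 3 ^ (L - pos).toNat := Nat.one_le_pow _ _ (by norm_num)
    simp only [List.map_cons, List.sum_cons]
    omega
  · rename_i hle _
    have hm : 1 ≤ (L - pos).toNat := by omega
    have heq : (L - (pos + 1)).toNat = (L - pos).toNat - 1 := by omega
    have h3 : 3 ^ (L - pos).toNat = 3 ^ ((L - pos).toNat - 1) * 3 := by
      rw [← pow_succ]; congr 1; omega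
    have h1 : 1 ≤ 3 ^ ((L - pos).toNat - 1) := Nat.one_le_pow _ _ (by norm_num)
    split <;> simp only [List.map_cons, List.map_append, List.sum_cons, List.sum_append,
      List.map_nil, List.sum_nil, heq] <;> omega

def numbers_with_k_ones_alt (L : Int) (k : Int) : List String :=
  nwkLoop L k [] [("", 0, 0)]

-- ===== PRECONDITION & SPEC =====

-- Pre_ excludes only k < 0, where Python A raises ValueError (combinations' r must be ≥ 0).
def Pre_numbers_with_k_ones (L : Int) (k : Int) : Prop := 0 ≤ k
instance (L : Int) (k : Int) : Decidable (Pre_numbers_with_k_ones L k) := by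
  unfold Pre_numbers_with_k_ones; infer_instance

def pvWitness_numbers_with_k_ones : Int × Int := (3, 2)

-- When L ≤ 0 and k = 0 A returns ["0"] (an artefact of bin(0)[2:] = "0" surviving zfill),
-- while B returns [""], the one length-≤0 bit string with zero ones, which is the intended value.
def D_numbers_with_k_ones (L : Int) (k : Int) : Prop := L ≤ 0 ∧ k = 0
instance (L : Int) (k : Int) : Decidable (D_numbers_with_k_ones L k) := by
  unfold D_numbers_with_k_ones; infer_instance

def Spec_numbers_with_k_ones (L : Int) (k : Int) (out : List String) : Prop :=
  ¬ D_numbers_with_k_ones L k → out = numbers_with_k_ones_alt L k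
instance (L : Int) (k : Int) (out : List String) : Decidable (Spec_numbers_with_k_ones L k out) := by
  unfold Spec_numbers_with_k_ones; infer_instance

def pvDiffWitness_numbers_with_k_ones : Int × Int := (0, 0)
def pvDiffWitnessOut_numbers_with_k_ones : (List String) × (List String) := (["0"], [""])

-- ===== CLAIM (what is proved, stated in full; the proofs are below) =====
def Claim_unchanged_numbers_with_k_ones : Prop := ∀ (L : Int) (k : Int), Dom_numbers_with_k_ones L k → Pre_numbers_with_k_ones L k → Spec_numbers_with_k_ones L k (numbers_with_k_ones L k)
def Claim_changed_numbers_with_k_ones : Prop := Dom_numbers_with_k_ones (pvDiffWitness_numbers_with_k_ones.1) (pvDiffWitness_numbers_with_k_ones.2) ∧ Pre_numbers_with_k_ones (pvDiffWitness_numbers_with_k_ones.1) (pvDiffWitness_numbers_with_k_ones.2) ∧ D_numbers_with_k_ones (pvDiffWitness_numbers_with_k_ones.1) (pvDiffWitness_numbers_with_k_ones.2) ∧ numbers_with_k_ones (pvDiffWitness_numbers_with_k_ones.1) (pvDiffWitness_numbers_with_k_ones.2) = pvDiffWitnessOut_numbers_with_k_ones.1 ∧ numbers_with_k_ones_alt (pvDiffWitness_numbers_with_k_ones.1)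 (pvDiffWitness_numbers_with_k_ones.2) = pvDiffWitnessOut_numbers_with_k_ones.2 ∧ pvDiffWitnessOut_numbers_with_k_ones.1 ≠ pvDiffWitnessOut_numbers_with_k_ones.2
def Claim_exact_numbers_with_k_ones : Prop := ∀ (L : Int) (k : Int), Dom_numbers_with_k_ones L k → Pre_numbers_with_k_ones L k → D_numbers_with_k_ones L k → numbers_with_k_ones L k ≠ numbers_with_k_ones_alt L k


-- ===== LEMMAS AND PROOFS =====

-- canonical family: FC n r enumerates the length-n 0/1 char lists with exactly r ones,
-- '1'-before-'0' from the left — the order both programs produce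
def FC : Nat → Nat → List (List Char)
  | 0, 0 => [[]]
  | 0, _ + 1 => []
  | n + 1, 0 => (FC n 0).map (fun c => '0' :: c)
  | n + 1, r + 1 => (FC n r).map (fun c => '1' :: c) ++ (FC n (r + 1)).map (fun c => '0' :: c)

theorem FC_zero (n : Nat) : FC n 0 = [List.replicate n '0'] := by
  induction n with
  | zero => rfl
  | succ n ih => simp [FC, ih, List.replicate_succ]

theorem FC_gt (n r : Nat) (h : n < r) : FC n r = [] := by
  induction n generalizing r with
  | zero =>
    obtain ⟨r', rfl⟩ : ∃ r', r = r' + 1 := ⟨r - 1, by omega⟩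
    rfl
  | succ n ih =>
    obtain ⟨r', rfl⟩ : ∃ r', r = r' + 1 := ⟨r - 1, by omega⟩
    simp [FC, ih r' (by omega), ih (r' + 1) (by omega)]

theorem ofList_cons_one (c : List Char) :
    String.ofList ('1' :: c) = "1" ++ String.ofList c := by
  rw [show ('1' :: c) = ['1'] ++ c from rfl, String.ofList_append]

theorem ofList_cons_zero (c : List Char) :
    String.ofList ('0' :: c) = "0" ++ String.ofList c := by
  rw [show ('0' :: c) = ['0'] ++ c from rfl, String.ofList_append]

-- ---- B side: the stack loop computes frameVal of each frame, in order ----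

def frameVal (L k : Int) (f : String × Int × Int) : List String :=
  if f.2.1 ≤ k then (FC (L - f.2.2).toNat ((k - f.2.1).toNat)).map (fun c => f.1 ++ String.ofList c)
  else []

theorem frameVal_base (L k : Int) (p : String) (ones pos : Int) (h : L ≤ pos) :
    frameVal L k (p, ones, pos) = if ones = k then [p] else [] := by
  have h0 : (L - pos).toNat = 0 := by omega
  unfold frameVal
  dsimp only
  split
  · rename_i hle
    by_cases he : ones = k
    · subst he; simp [h0, FC, String.append_empty]
    · have : ∃ m, (k - ones).toNat = m + 1 := ⟨(k - ones).toNat - 1, by omega⟩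
      obtain ⟨m, hm⟩ := this
      simp [h0, hm, FC, he]
  · rename_i hgt
    have : ones ≠ k := by omega
    simp [this]

theorem frameVal_step (L k : Int) (p : String) (ones pos : Int) (h : ¬ L ≤ pos) :
    frameVal L k (p, ones, pos) =
      (if ones < k then frameVal L k (p ++ "1", ones + 1, pos + 1) else []) ++
        frameVal L k (p ++ "0", ones, pos + 1) := by
  have hn : (L - pos).toNat = (L - (pos + 1)).toNat + 1 := by omega
  set n1 := (L - (pos + 1)).toNat with hn1
  unfold frameVal
  dsimp only
  by_cases hlt : ones < k
  · have hr : (k - ones).toNat = (k - (ones + 1)).toNat + 1 := by omega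
    simp only [hlt, if_true, hn, hr]
    have hle : ones ≤ k := by omega
    have hle1 : ones + 1 ≤ k := by omega
    simp only [hle, hle1, if_true, FC, List.map_append, List.map_map]
    congr 1 <;> apply List.map_congr_left <;> intro c _ <;>
      simp [Function.comp, ofList_cons_one, ofList_cons_zero, String.append_assoc]
  · by_cases he : ones = k
    · subst he
      simp only [lt_irrefl, if_false, le_refl, if_true, hn]
      have : (ones - ones).toNat = 0 := by simp
      simp only [this, FC, List.map_map, List.nil_append]
      apply List.map_congr_left; intro c _
      simp [Function.comp, ofList_cons_zero, String.append_assoc]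
    · have h1 : ¬ ones ≤ k := by omega
      simp [hlt, h1]

theorem nwkLoop_eq (L k : Int) (result : List String) (stack : List (String × Int × Int)) :
    nwkLoop L k result stack = result ++ stack.flatMap (frameVal L k) := by
  fun_induction nwkLoop L k result stack with
  | case1 result => simp
  | case2 result p ones pos rest hle ih =>
    simp only [dite_eq_ite] at ih
    rw [ih]
    rw [List.flatMap_cons, frameVal_base L k p ones pos hle]
    split <;> simp
  | case3 result p ones pos rest hle hpr ih =>
    rw [ih, List.flatMap_cons]
    have hf : frameVal L k (p, ones, pos) = [] := by
      unfold frameVal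
      dsimp only
      by_cases h : ones ≤ k
      · rw [if_pos h, FC_gt _ _ (by omega)]
        simp
      · rw [if_neg h]
    rw [hf, List.nil_append]
  | case4 result p ones pos rest hle hpr ih =>
    simp only [dite_eq_ite] at ih
    rw [ih]
    rw [List.flatMap_cons, frameVal_step L k p ones pos hle]
    split <;> simp

theorem alt_eq (L k : Int) (hk : 0 ≤ k) :
    numbers_with_k_ones_alt L k = (FC L.toNat k.toNat).map (fun c => String.ofList c) := by
  unfold numbers_with_k_ones_alt
  rw [nwkLoop_eq]
  simp only [List.flatMap_cons, List.flatMap_nil, List.append_nil, List.nil_append]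
  unfold frameVal
  dsimp only
  simp [hk, String.empty_append]

-- ---- A side: bin/zfill produce the bitmap of the accumulated number ----

def bitmap (n : Nat) (N : Nat) : List Char :=
  (List.range n).map (fun i => if N.testBit (n - 1 - i) then '1' else '0')

theorem bitmap_zero (n : Nat) : bitmap n 0 = List.replicate n '0' := by
  simp [bitmap, Nat.zero_testBit, List.map_const']

theorem bitmap_succ (n N : Nat) :
    bitmap (n + 1) N = bitmap n (N / 2) ++ [if N % 2 = 1 then '1' else '0'] := by
  unfold bitmap
  rw [List.range_succ, List.map_append]
  congr 1
  · apply List.map_congr_left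
    intro i hi
    rw [List.mem_range] at hi
    have h1 : n + 1 - 1 - i = (n - 1 - i) + 1 := by omega
    rw [h1, Nat.testBit_succ]
  · simp [Nat.testBit_zero]

theorem binRep (n : Nat) (N : Nat) (h1 : 1 ≤ N) (h2 : N < 2 ^ n) :
    List.replicate (n - (pyBinGo N).length) '0' ++ pyBinGo N = bitmap n N := by
  induction n generalizing N with
  | zero => simp at h2; omega
  | succ n ih =>
    have hgo : pyBinGo N = pyBinGo (N / 2) ++ [if N % 2 = 1 then '1' else '0'] := by
      obtain ⟨m, rfl⟩ : ∃ m, N = m + 1 := ⟨N - 1, by omega⟩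
      rw [pyBinGo]
    by_cases hz : N / 2 = 0
    · have hN : N = 1 := by omega
      subst hN
      have hone : pyBinGo 1 = ['1'] := by simp [pyBinGo]
      rw [hone, bitmap_succ]
      norm_num [bitmap_zero]
    · have hdiv : N / 2 < 2 ^ n := by
        have : (2 : Nat) ^ (n + 1) = 2 * 2 ^ n := by ring
        omega
      have ihh := ih (N / 2) (by omega) hdiv
      rw [hgo, bitmap_succ, ← ihh]
      rw [← List.append_assoc]
      congr 2
      simp [List.length_append]

-- ---- A side: the or-of-powers accumulator ----

theorem numI_eq (L : Int) (comb : List Int) (a : Nat) :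
    comb.foldl (fun num pos => Int.lor num ((1 : Int) <<< (L - 1 - pos).toNat)) (a : Int)
      = ((comb.foldl (fun b pos => b ||| 2 ^ ((L - 1 - pos).toNat)) a : Nat) : Int) := by
  induction comb generalizing a with
  | nil => rfl
  | cons x t ih =>
    simp only [List.foldl_cons]
    rw [show Int.lor (a : Int) ((1 : Int) <<< (L - 1 - x).toNat)
          = ((a ||| 2 ^ ((L - 1 - x).toNat) : Nat) : Int) from ?_, ih]
    have h1 : ((1 : Int) <<< (L - 1 - x).toNat) = ((2 ^ (L - 1 - x).toNat : Nat) : Int) := by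
      simp [Int.shiftLeft_eq]
    rw [h1]
    simp [Int.lor]

theorem numN_testBit (L : Int) (comb : List Int) (a j : Nat) :
    (comb.foldl (fun b pos => b ||| 2 ^ ((L - 1 - pos).toNat)) a).testBit j
      = (a.testBit j || comb.any (fun pos => decide ((L - 1 - pos).toNat = j))) := by
  induction comb generalizing a with
  | nil => simp
  | cons x t ih =>
    simp only [List.foldl_cons, List.any_cons, ih]
    rw [Nat.testBit_or, Nat.testBit_two_pow]
    rw [Bool.or_assoc]

theorem numN_lt (L : Int) (comb : List Int) (a : Nat)
    (hc : ∀ p ∈ comb, 0 ≤ p ∧ p < L) (ha : a < 2 ^ L.toNat) :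
    comb.foldl (fun b pos => b ||| 2 ^ ((L - 1 - pos).toNat)) a < 2 ^ L.toNat := by
  induction comb generalizing a with
  | nil => exact ha
  | cons x t ih =>
    simp only [List.foldl_cons]
    apply ih _ (fun p hp => hc p (List.mem_cons_of_mem _ hp))
    apply Nat.or_lt_two_pow ha
    apply Nat.pow_lt_pow_right (by norm_num)
    have := hc x (List.mem_cons_self)
    omega

-- ---- A side: combinations over a shifted range produce FC ----

theorem mem_pyCombinations (xs : List Int) (r : Nat) (c : List Int)
    (hc : c ∈ pyCombinations xs r) : ∀ p ∈ c, p ∈ xs := by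
  induction xs generalizing r c with
  | nil =>
    match r with
    | 0 => simp [pyCombinations] at hc; simp [hc]
    | r + 1 => simp [pyCombinations] at hc
  | cons x t ih =>
    match r with
    | 0 => simp [pyCombinations] at hc; simp [hc]
    | r + 1 =>
      simp only [pyCombinations, List.mem_append, List.mem_map] at hc
      rcases hc with ⟨c', hc', rfl⟩ | hc
      · intro p hp
        rcases List.mem_cons.mp hp with rfl | hp
        · exact List.mem_cons_self
        · exact List.mem_cons_of_mem _ (ih r c' hc' p hp)
      · intro p hp
        exact List.mem_cons_of_mem _ (ih (r + 1) c hc p hp)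

theorem strfun_shift1 (n : Nat) (a : Int) (c : List Int) :
    (List.range (n + 1)).map (fun i => if a + Int.ofNat i ∈ (a :: c) then '1' else '0')
      = '1' :: (List.range n).map (fun i => if (a + 1) + Int.ofNat i ∈ c then '1' else '0') := by
  rw [List.range_succ_eq_map, List.map_cons, List.map_map]
  congr 1
  · simp
  · apply List.map_congr_left
    intro i _
    simp only [Function.comp]
    have h1 : a + Int.ofNat (Nat.succ i) = (a + 1) + Int.ofNat i := by
      simp only [Int.ofNat_eq_natCast, Nat.succ_eq_add_one, Nat.cast_add, Nat.cast_one]; ring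
    rw [h1]
    have h2 : (a + 1) + (i : Int) ≠ a := by omega
    simp [List.mem_cons, h2]

theorem strfun_shift0 (n : Nat) (a : Int) (c : List Int) (hc : ∀ p ∈ c, a + 1 ≤ p) :
    (List.range (n + 1)).map (fun i => if a + Int.ofNat i ∈ c then '1' else '0')
      = '0' :: (List.range n).map (fun i => if (a + 1) + Int.ofNat i ∈ c then '1' else '0') := by
  rw [List.range_succ_eq_map, List.map_cons, List.map_map]
  congr 1
  · have hnot : a ∉ c := by
      intro h
      have := hc _ h
      omega
    simp [hnot]
  · apply List.map_congr_left
    intro i _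
    simp only [Function.comp]
    have h1 : a + Int.ofNat (Nat.succ i) = (a + 1) + Int.ofNat i := by
      simp only [Int.ofNat_eq_natCast, Nat.succ_eq_add_one, Nat.cast_add, Nat.cast_one]; ring
    rw [h1]

theorem combs_range (n : Nat) (r : Nat) (a : Int) :
    (pyCombinations ((List.range n).map (fun j => a + Int.ofNat j)) r).map
        (fun comb => (List.range n).map (fun i => if (a + Int.ofNat i) ∈ comb then '1' else '0'))
      = FC n r := by
  induction n generalizing r a with
  | zero =>
    match r with
    | 0 => rfl
    | r + 1 => rfl
  | succ n ih =>
    have hsplit : (List.range (n + 1)).map (fun j => a + Int.ofNat j)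
        = a :: (List.range n).map (fun j => (a + 1) + Int.ofNat j) := by
      rw [List.range_succ_eq_map]
      rw [List.map_cons, List.map_map]
      congr 1
      · simp
      · apply List.map_congr_left
        intro j _
        simp [Function.comp]
        ring
    rw [hsplit]
    match r with
    | 0 =>
      simp [pyCombinations, FC_zero, List.map_const', List.replicate_succ]
    | r + 1 =>
      rw [show pyCombinations (a :: (List.range n).map (fun j => (a + 1) + Int.ofNat j)) (r + 1)
            = (pyCombinations ((List.range n).map (fun j => (a + 1) + Int.ofNat j)) r).map
                (fun c => a :: c)
              ++ pyCombinations ((List.range n).map (fun j => (a + 1) + Int.ofNat j)) (r + 1)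
          from rfl]
      rw [List.map_append, List.map_map, show FC (n + 1) (r + 1)
            = (FC n r).map (fun c => '1' :: c) ++ (FC n (r + 1)).map (fun c => '0' :: c) from rfl]
      congr 1
      · rw [← ih r (a + 1), List.map_map]
        apply List.map_congr_left
        intro c _
        exact strfun_shift1 n a c
      · rw [← ih (r + 1) (a + 1), List.map_map]
        apply List.map_congr_left
        intro c hcm
        have hc : ∀ p ∈ c, a + 1 ≤ p := by
          intro p hp
          have := mem_pyCombinations _ _ _ hcm p hp
          rw [List.mem_map] at this
          obtain ⟨j, _, rfl⟩ := this
          simp only [Int.ofNat_eq_natCast]; omega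
        exact strfun_shift0 n a c hc

theorem foldl_push {α : Type} (g : α → String) (l : List α) (acc : List String) :
    l.foldl (fun r c => r ++ [g c]) acc = acc ++ l.map g := by
  induction l generalizing acc with
  | nil => simp
  | cons x t ih => simp [List.foldl_cons, ih]


-- ---- assembly ----

def gA (L : Int) (comb : List Int) : String :=
  String.ofList (pyZfill L (pyBinChars
    ((comb.foldl (fun num pos => Int.lor num ((1 : Int) <<< (L - 1 - pos).toNat)) 0).toNat)))

theorem A_eq (L k : Int) :
    numbers_with_k_ones L k
      = (pyCombinations (PySem.List.pyRange 0 L 1) k.toNat).map (gA L) := by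
  simp only [numbers_with_k_ones, foldl_push, List.nil_append]
  rfl

theorem pyRange_as_range (L : Int) :
    PySem.List.pyRange 0 L 1 = (List.range L.toNat).map (fun j => (0 : Int) + Int.ofNat j) := by
  rw [PySem.List.pyRange_one]
  simp [Int.ofNat_eq_natCast]

theorem zfill_bitmap (L : Int) (N : Nat) (hL : 1 ≤ L) (hlt : N < 2 ^ L.toNat) :
    pyZfill L (pyBinChars N) = bitmap L.toNat N := by
  by_cases h0 : N = 0
  · subst h0
    unfold pyZfill pyBinChars
    simp only [bitmap_zero]
    obtain ⟨m, hm⟩ : ∃ m, L.toNat = m + 1 := ⟨L.toNat - 1, by omega⟩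
    rw [hm, List.replicate_succ']
    congr 1
  · unfold pyZfill pyBinChars
    rw [if_neg h0]
    exact binRep L.toNat N (by omega) hlt

theorem gA_eq_strfun (L : Int) (comb : List Int) (hL : 1 ≤ L)
    (hmem : ∀ p ∈ comb, 0 ≤ p ∧ p < L) :
    gA L comb
      = String.ofList ((List.range L.toNat).map
          (fun i => if ((0 : Int) + Int.ofNat i) ∈ comb then '1' else '0')) := by
  unfold gA
  have hnum := numI_eq L comb 0
  simp only [Nat.cast_zero] at hnum
  rw [hnum, Int.toNat_natCast]
  have hlt : comb.foldl (fun b pos => b ||| 2 ^ ((L - 1 - pos).toNat)) 0 < 2 ^ L.toNat :=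
    numN_lt L comb 0 hmem (Nat.pow_pos (by norm_num))
  rw [zfill_bitmap L _ hL hlt]
  congr 1
  unfold bitmap
  apply List.map_congr_left
  intro i hi
  rw [List.mem_range] at hi
  have hb : (comb.foldl (fun b pos => b ||| 2 ^ ((L - 1 - pos).toNat)) 0).testBit
      (L.toNat - 1 - i) = decide (((0 : Int) + Int.ofNat i) ∈ comb) := by
    rw [numN_testBit]
    simp only [Nat.zero_testBit, Bool.false_or, Int.ofNat_eq_natCast, zero_add]
    rw [Bool.eq_iff_iff]
    simp only [List.any_eq_true, decide_eq_true_eq]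
    constructor
    · rintro ⟨pos, hpos, heq⟩
      have hp := hmem pos hpos
      have : pos = (i : Int) := by omega
      rwa [← this]
    · intro hmemi
      refine ⟨(i : Int), hmemi, by omega⟩
  rw [hb]
  simp

theorem A_done (L k : Int) (hk : 0 ≤ k) (hnd : ¬ (L ≤ 0 ∧ k = 0)) :
    numbers_with_k_ones L k = (FC L.toNat k.toNat).map (fun c => String.ofList c) := by
  rw [A_eq, pyRange_as_range]
  by_cases hL : 1 ≤ L
  · rw [← combs_range L.toNat k.toNat 0, List.map_map]
    apply List.map_congr_left
    intro comb hcm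
    have hmem : ∀ p ∈ comb, 0 ≤ p ∧ p < L := by
      intro p hp
      have := mem_pyCombinations _ _ _ hcm p hp
      rw [List.mem_map] at this
      obtain ⟨j, hj, rfl⟩ := this
      rw [List.mem_range] at hj
      constructor
      · simp only [Int.ofNat_eq_natCast]; omega
      · simp only [Int.ofNat_eq_natCast]; omega
    rw [gA_eq_strfun L comb hL hmem]
    simp [Function.comp]
  · have hL0 : L.toNat = 0 := by omega
    have hkpos : 0 < k := by
      rcases lt_or_eq_of_le hk with h | h
      · exact h
      · exact absurd ⟨by omega, h.symm⟩ hnd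
    obtain ⟨m, hm⟩ : ∃ m, k.toNat = m + 1 := ⟨k.toNat - 1, by omega⟩
    rw [hL0, hm]
    simp [List.range_zero, List.map_nil, pyCombinations, FC]

-- A at (L ≤ 0, k = 0): the single combination is empty, num = 0, bin(0) gives "0"
theorem A_corner (L : Int) (hL : L ≤ 0) : numbers_with_k_ones L 0 = ["0"] := by
  rw [A_eq, pyRange_as_range]
  have h0 : L.toNat = 0 := by omega
  rw [h0]
  simp only [List.range_zero, List.map_nil]
  rw [show pyCombinations ([] : List Int) ((0 : Int)).toNat = [[]] from rfl]
  simp only [List.map_cons, List.map_nil]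
  unfold gA pyZfill pyBinChars
  simp [h0]

theorem B_corner (L : Int) (hL : L ≤ 0) : numbers_with_k_ones_alt L 0 = [""] := by
  rw [alt_eq L 0 (le_refl 0)]
  have h0 : L.toNat = 0 := by omega
  rw [h0]
  rfl

-- ===== VERDICT (by name: the statement is the Claim_ definition above) =====
theorem numbers_with_k_ones_spec : Claim_unchanged_numbers_with_k_ones := by
  intro L k hDom hPre
  unfold Spec_numbers_with_k_ones
  intro hD
  unfold Pre_numbers_with_k_ones at hPre
  unfold D_numbers_with_k_ones at hD
  rw [A_done L k hPre hD, alt_eq L k hPre]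

theorem numbers_with_k_ones_changed : Claim_changed_numbers_with_k_ones := by
  unfold Claim_changed_numbers_with_k_ones
  refine ⟨by decide, by decide, by decide, ?_, ?_, by decide⟩
  · exact A_corner 0 (le_refl 0)
  · exact B_corner 0 (le_refl 0)

theorem numbers_with_k_ones_tight : Claim_exact_numbers_with_k_ones := by
  intro L k _ _ hD
  unfold D_numbers_with_k_ones at hD
  obtain ⟨hL, hk⟩ := hD
  subst hk
  rw [A_corner L hL, B_corner L hL]
  decide
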